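-- pv_equiv track=rewrite | github.com/parklab/xTea | src/xtea/x_polyA.py | contain_poly_A_T
-- ===== SOURCE A (Python) =====
-- def contain_poly_A_T(seq, n_min_cnt):
--     max_A = 0
--     max_T = 0
--     cum_A = 0
--     cum_T = 0
--     for ch in seq:
--         if ch == 'A' or ch == 'a':
--             cum_A += 1
--         else:
--             if cum_A > max_A:
--                 max_A = cum_A
--             cum_A = 0
--
--         if ch == 'T' or ch == 't':
--             cum_T += 1
--         else:
--             if cum_T > max_T:
--                 max_T = cum_T
--             cum_T = 0
--     if cum_A > max_A:
--         max_A = cum_A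
--     if cum_T > max_T:
--         max_T = cum_T
--
--     if max_A >= n_min_cnt or max_T >= n_min_cnt:
--         return True
--     else:
--         return False
-- ===== SOURCE B (Python) =====
-- def contain_poly_A_T(seq, n_min_cnt):
--     if n_min_cnt > len(seq):
--         return False
--     s = seq.upper()
--     return ('A' * n_min_cnt) in s or ('T' * n_min_cnt) in s
-- ===== Notes on version B (the rewrite author's own statement) =====
-- stated objective: faster
-- what changed: Replaces the manual per-character run-length counters (cum_A/cum_T/max_A/max_T) with a length guard, one uppercase pass and two substring-containment tests 'A'*n in s / 'T'*n in s.
import Mathlib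
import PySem

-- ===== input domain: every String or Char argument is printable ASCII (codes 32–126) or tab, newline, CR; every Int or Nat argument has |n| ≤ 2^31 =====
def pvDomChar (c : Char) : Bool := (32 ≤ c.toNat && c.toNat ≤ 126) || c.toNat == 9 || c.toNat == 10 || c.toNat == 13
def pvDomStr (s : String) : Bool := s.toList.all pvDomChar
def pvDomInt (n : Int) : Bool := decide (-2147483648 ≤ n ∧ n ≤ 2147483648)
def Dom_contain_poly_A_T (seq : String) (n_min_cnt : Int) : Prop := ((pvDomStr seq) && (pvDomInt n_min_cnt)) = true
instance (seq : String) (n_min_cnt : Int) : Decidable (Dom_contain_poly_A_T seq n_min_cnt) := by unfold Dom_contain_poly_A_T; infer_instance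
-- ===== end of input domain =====

-- B replaces A's manual run-length counters with a length guard, one uppercase pass and
-- two substring-containment tests ('A'*n in s / 'T'*n in s): same O(n), measured faster
-- (C-level substring search instead of a per-character Python loop).


-- ===== PORT A =====
-- the body of A's for-loop: state is (max_A, max_T, cum_A, cum_T)
def pvStepA (s : Int × Int × Int × Int) (ch : Char) : Int × Int × Int × Int :=
  let (max_A, cum_A) :=
    if ch == 'A' || ch == 'a' then (s.1, s.2.2.1 + 1)
    else ((if s.2.2.1 > s.1 then s.2.2.1 else s.1), 0)
  let (max_T, cum_T) :=
    if ch == 'T' || ch == 't' then (s.2.1, s.2.2.2 + 1)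
    else ((if s.2.2.2 > s.2.1 then s.2.2.2 else s.2.1), 0)
  (max_A, max_T, cum_A, cum_T)

-- literal transliteration of A: a left-to-right fold of pvStepA, then the two trailing max updates
def contain_poly_A_T (seq : String) (n_min_cnt : Int) : Bool :=
  let st := seq.toList.foldl pvStepA (0, 0, 0, 0)
  let max_A := if st.2.2.1 > st.1 then st.2.2.1 else st.1
  let max_T := if st.2.2.2 > st.2.1 then st.2.2.2 else st.2.1
  if max_A ≥ n_min_cnt ∨ max_T ≥ n_min_cnt then true else false

-- ===== PORT B =====
-- literal transliteration of B: s = seq.upper(); ('A'*n in s) or ('T'*n in s)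
-- (a run longer than the sequence cannot occur, so B returns False outright there)
def contain_poly_A_T_alt (seq : String) (n_min_cnt : Int) : Bool :=
  if n_min_cnt > PySem.Str.len seq then false
  else
    let s := PySem.Str.upper seq
    PySem.Str.isIn (String.ofList (List.replicate n_min_cnt.toNat 'A')) s
      || PySem.Str.isIn (String.ofList (List.replicate n_min_cnt.toNat 'T')) s

-- ===== PRECONDITION & SPEC =====
def Spec_contain_poly_A_T (seq : String) (n_min_cnt : Int) (out : Bool) : Prop := out = contain_poly_A_T_alt seq n_min_cnt
instance (seq : String) (n_min_cnt : Int) (out : Bool) : Decidable (Spec_contain_poly_A_T seq n_min_cnt out) := by unfold Spec_contain_poly_A_T; infer_instance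

-- ===== CLAIM (what is proved, stated in full; the proofs are below) =====
def Claim_equal_contain_poly_A_T : Prop := ∀ (seq : String) (n_min_cnt : Int), Dom_contain_poly_A_T seq n_min_cnt → Spec_contain_poly_A_T seq n_min_cnt (contain_poly_A_T seq n_min_cnt)

-- ===== LEMMAS AND PROOFS =====

-- character-class predicates of A's scan
def pvIsA (c : Char) : Bool := c == 'A' || c == 'a'
def pvIsT (c : Char) : Bool := c == 'T' || c == 't'

-- the Nat mirror of one of A's two (best, cur) counter pairs
def pvSFold (p : Char → Bool) (l : List Char) (s : Nat × Nat) : Nat × Nat :=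
  l.foldl (fun s c => if p c then (s.1, s.2 + 1) else (max s.1 s.2, 0)) s

-- maximal run length of p-characters, with the trailing max applied
def pvMaxRunAux (p : Char → Bool) : List Char → Nat → Nat → Nat
  | [], cur, best => max best cur
  | c :: rest, cur, best =>
      if p c then pvMaxRunAux p rest (cur + 1) best
      else pvMaxRunAux p rest 0 (max best cur)

theorem pv_char_eq_iff_toNat (c d : Char) : c = d ↔ c.toNat = d.toNat := by
  constructor
  · rintro rfl; rfl
  · intro h
    exact Char.ext (UInt32.toNat_inj.mp h)

theorem pv_upperChar_eq_iff (U L c : Char)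
    (hU : 65 ≤ U.toNat ∧ U.toNat ≤ 90) (hL : L.toNat = U.toNat + 32) :
    (PySem.Chars.upperChar c = U) ↔ (c = U ∨ c = L) := by
  simp only [PySem.Chars.upperChar, PySem.Chars.islower]
  rw [pv_char_eq_iff_toNat c U, pv_char_eq_iff_toNat c L]
  split_ifs with h
  · simp only [Bool.and_eq_true, decide_eq_true_eq] at h
    have h1 : 97 ≤ c.toNat := UInt32.le_iff_toNat_le.mp (Char.le_def.mp h.1)
    have h2 : c.toNat ≤ 122 := UInt32.le_iff_toNat_le.mp (Char.le_def.mp h.2)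
    have hvalid : (c.toNat - 32).isValidChar := by left; omega
    have hv : (Char.ofNat (c.toNat - 32)).toNat = c.toNat - 32 := by
      rw [Char.toNat_ofNat, if_pos hvalid]
    rw [pv_char_eq_iff_toNat _ U, hv]
    omega
  · simp only [Bool.and_eq_true, decide_eq_true_eq, not_and_or, not_le] at h
    have hc : c.toNat < 97 ∨ 122 < c.toNat := by
      rcases h with h | h
      · exact Or.inl (UInt32.lt_iff_toNat_lt.mp (Char.lt_def.mp h))
      · exact Or.inr (UInt32.lt_iff_toNat_lt.mp (Char.lt_def.mp h))
    rw [pv_char_eq_iff_toNat c U]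
    omega

-- A's Int fold equals the two Nat pair-folds, componentwise
theorem pv_foldA_eq (l : List Char) (mA mT cA cT : Nat) :
    l.foldl pvStepA ((mA : Int), (mT : Int), (cA : Int), (cT : Int)) =
    ((((pvSFold pvIsA l (mA, cA)).1 : Int)), (((pvSFold pvIsT l (mT, cT)).1 : Int)),
      (((pvSFold pvIsA l (mA, cA)).2 : Int)), (((pvSFold pvIsT l (mT, cT)).2 : Int))) := by
  induction l generalizing mA mT cA cT with
  | nil => simp [pvSFold]
  | cons c rest ih =>
    have hmaxA : ((if (cA : Int) > (mA : Int) then (cA : Int) else (mA : Int))) = ((max mA cA : Nat) : Int) := by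
      split_ifs <;> push_cast <;> omega
    have hmaxT : ((if (cT : Int) > (mT : Int) then (cT : Int) else (mT : Int))) = ((max mT cT : Nat) : Int) := by
      split_ifs <;> push_cast <;> omega
    by_cases hA : (c == 'A' || c == 'a') = true <;> by_cases hT : (c == 'T' || c == 't') = true
    · have hstep : pvStepA ((mA : Int), (mT : Int), (cA : Int), (cT : Int)) c =
          (((mA : Nat) : Int), ((mT : Nat) : Int), ((cA + 1 : Nat) : Int), ((cT + 1 : Nat) : Int)) := by
        simp [pvStepA, hA, hT]
      simp only [List.foldl_cons, hstep, ih, pvSFold, pvIsA, pvIsT, hA, hT, if_true]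
    · have hstep : pvStepA ((mA : Int), (mT : Int), (cA : Int), (cT : Int)) c =
          (((mA : Nat) : Int), ((max mT cT : Nat) : Int), ((cA + 1 : Nat) : Int), ((0 : Nat) : Int)) := by
        simp [pvStepA, hA, hT]
        split_ifs <;> omega
      simp only [List.foldl_cons, hstep, ih, pvSFold, pvIsA, pvIsT, hA, hT, if_true,
        Bool.false_eq_true, if_false]
    · have hstep : pvStepA ((mA : Int), (mT : Int), (cA : Int), (cT : Int)) c =
          (((max mA cA : Nat) : Int), ((mT : Nat) : Int), ((0 : Nat) : Int), ((cT + 1 : Nat) : Int)) := by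
        simp [pvStepA, hA, hT]
        split_ifs <;> omega
      simp only [List.foldl_cons, hstep, ih, pvSFold, pvIsA, pvIsT, hA, hT, if_true,
        Bool.false_eq_true, if_false]
    · have hstep : pvStepA ((mA : Int), (mT : Int), (cA : Int), (cT : Int)) c =
          (((max mA cA : Nat) : Int), ((max mT cT : Nat) : Int), ((0 : Nat) : Int), ((0 : Nat) : Int)) := by
        simp [pvStepA, hA, hT]
        split_ifs <;> omega
      simp only [List.foldl_cons, hstep, ih, pvSFold, pvIsA, pvIsT, hA, hT,
        Bool.false_eq_true, if_false]

-- the pair fold followed by the trailing max is pvMaxRunAux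
theorem pv_sFold_max (p : Char → Bool) (l : List Char) (best cur : Nat) :
    max (pvSFold p l (best, cur)).1 (pvSFold p l (best, cur)).2 = pvMaxRunAux p l cur best := by
  induction l generalizing best cur with
  | nil => simp [pvSFold, pvMaxRunAux]
  | cons c rest ih =>
    simp only [pvSFold, List.foldl_cons, pvMaxRunAux] at *
    by_cases h : p c = true <;> simp only [h, if_true, Bool.false_eq_true, if_false] <;> apply ih

-- an all-p prefix is no longer than the takeWhile block
theorem pv_prefix_all_le_takeWhile (p : Char → Bool) (t l : List Char)
    (hpre : t <+: l) (hall : ∀ c ∈ t, p c = true) :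
    t.length ≤ (l.takeWhile p).length := by
  induction t generalizing l with
  | nil => simp
  | cons c t' ih =>
    rcases l with _ | ⟨d, l'⟩
    · simp at hpre
    · have hcd : c = d := (List.cons_prefix_cons.mp hpre).1
      subst hcd
      have hp : p c = true := hall c (by simp)
      have hpre' : t' <+: l' := (List.cons_prefix_cons.mp hpre).2
      simp only [List.takeWhile_cons, hp, if_true, List.length_cons, Nat.add_le_add_iff_right]
      exact ih l' hpre' (fun x hx => hall x (by simp [hx]))

-- a long-enough takeWhile block yields an all-p infix of exactly length k
theorem pv_exists_run_of_le_takeWhile (p : Char → Bool) (l : List Char) (k : Nat)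
    (h : k ≤ (l.takeWhile p).length) :
    ∃ t, t <:+: l ∧ t.length = k ∧ ∀ c ∈ t, p c = true := by
  refine ⟨(l.takeWhile p).take k, ?_, ?_, ?_⟩
  · exact ((List.take_prefix k _).trans (List.takeWhile_prefix p)).isInfix
  · simpa using h
  · intro c hc
    exact List.mem_takeWhile_imp (List.mem_of_mem_take hc)

-- the generalized characterization of pvMaxRunAux
theorem pv_le_maxRunAux_iff (p : Char → Bool) (l : List Char) (k cur best : Nat) :
    k ≤ pvMaxRunAux p l cur best ↔
      k ≤ best ∨ k ≤ cur + (l.takeWhile p).length ∨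
        ∃ t, t <:+: l ∧ t.length = k ∧ ∀ c ∈ t, p c = true := by
  induction l generalizing cur best with
  | nil =>
    simp only [pvMaxRunAux, List.takeWhile_nil, List.length_nil, Nat.add_zero, le_max_iff]
    constructor
    · rintro (h | h)
      · exact Or.inl h
      · exact Or.inr (Or.inl h)
    · rintro (h | h | ⟨t, ht, hlen, _⟩)
      · exact Or.inl h
      · exact Or.inr h
      · have ht0 : t = [] := List.eq_nil_of_infix_nil ht
        subst ht0; simp at hlen; exact Or.inr (by omega)
  | cons c rest ih =>
    by_cases hp : p c = true
    · simp only [pvMaxRunAux, hp, if_true, List.takeWhile_cons, List.length_cons]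
      rw [ih]
      constructor
      · rintro (h | h | ⟨t, ht, hlen, hall⟩)
        · exact Or.inl h
        · right; left; omega
        · exact Or.inr (Or.inr ⟨t, ht.trans (List.suffix_cons c _).isInfix, hlen, hall⟩)
      · rintro (h | h | ⟨t, ht, hlen, hall⟩)
        · exact Or.inl h
        · right; left; omega
        · rcases List.infix_cons_iff.mp ht with hpre | hinf
          · right; left
            have := pv_prefix_all_le_takeWhile p t (c :: rest) hpre hall
            simp only [List.takeWhile_cons, hp, if_true, List.length_cons] at this
            omega
          · exact Or.inr (Or.inr ⟨t, hinf, hlen, hall⟩)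
    · simp only [pvMaxRunAux, hp, Bool.false_eq_true, if_false, List.takeWhile_cons,
        List.length_nil, Nat.add_zero]
      rw [ih]
      constructor
      · rintro (h | h | ⟨t, ht, hlen, hall⟩)
        · rcases le_max_iff.mp h with h1 | h1
          · exact Or.inl h1
          · right; left; omega
        · right; right
          rcases pv_exists_run_of_le_takeWhile p rest k (by omega) with ⟨t, ht, hlen, hall⟩
          exact ⟨t, ht.trans (List.suffix_cons c _).isInfix, hlen, hall⟩
        · exact Or.inr (Or.inr ⟨t, ht.trans (List.suffix_cons c _).isInfix, hlen, hall⟩)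
      · rintro (h | h | ⟨t, ht, hlen, hall⟩)
        · exact Or.inl (le_max_iff.mpr (Or.inl h))
        · exact Or.inl (le_max_iff.mpr (Or.inr (by omega)))
        · rcases List.infix_cons_iff.mp ht with hpre | hinf
          · rcases t with _ | ⟨d, t'⟩
            · simp at hlen; right; left; omega
            · exfalso
              have hcd : d = c := (List.cons_prefix_cons.mp hpre).1
              exact hp (hcd ▸ hall d (by simp))
          · exact Or.inr (Or.inr ⟨t, hinf, hlen, hall⟩)

-- the clean corollary for A's start state
theorem pv_le_maxRun_iff (p : Char → Bool) (l : List Char) (k : Nat) :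
    k ≤ pvMaxRunAux p l 0 0 ↔ ∃ t, t <:+: l ∧ t.length = k ∧ ∀ c ∈ t, p c = true := by
  rw [pv_le_maxRunAux_iff]
  constructor
  · rintro (h | h | h)
    · exact ⟨[], List.nil_infix, by simp only [List.length_nil]; omega, by simp⟩
    · exact pv_exists_run_of_le_takeWhile p l k (by omega)
    · exact h
  · intro h; right; right; exact h

-- an infix of a mapped list is the image of an infix
theorem pv_infix_map_inv (f : Char → Char) (sub l : List Char) (h : sub <:+: l.map f) :
    ∃ t, t <:+: l ∧ t.map f = sub := by
  rcases h with ⟨s, t, hst⟩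
  have heq : l.map f = s ++ (sub ++ t) := by rw [← hst]; simp
  rcases List.map_eq_append_iff.mp heq with ⟨l₁, l₂, hl, _, h₂⟩
  rcases List.map_eq_append_iff.mp h₂ with ⟨l₃, l₄, hl₂, h₃, _⟩
  exact ⟨l₃, ⟨l₁, l₄, by rw [hl, hl₂, List.append_assoc]⟩, h₃⟩

-- run of p-chars ↔ replicate-U infix of the uppercased list
theorem pv_run_iff_replicate (p : Char → Bool) (U L : Char) (l : List Char) (k : Nat)
    (hU : 65 ≤ U.toNat ∧ U.toNat ≤ 90) (hL : L.toNat = U.toNat + 32)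
    (hp : ∀ c, p c = true ↔ (c = U ∨ c = L)) :
    (∃ t, t <:+: l ∧ t.length = k ∧ ∀ c ∈ t, p c = true) ↔
      List.replicate k U <:+: l.map PySem.Chars.upperChar := by
  constructor
  · rintro ⟨t, ht, hlen, hall⟩
    have hmap : t.map PySem.Chars.upperChar = List.replicate k U := by
      rw [List.eq_replicate_iff]
      constructor
      · simpa using hlen
      · intro b hb
        rcases List.mem_map.mp hb with ⟨c, hc, rfl⟩
        exact (pv_upperChar_eq_iff U L c hU hL).mpr ((hp c).mp (hall c hc))
    exact hmap ▸ ht.map PySem.Chars.upperChar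
  · intro h
    rcases pv_infix_map_inv PySem.Chars.upperChar _ l h with ⟨t, ht, hmap⟩
    refine ⟨t, ht, ?_, ?_⟩
    · have := congrArg List.length hmap; simpa using this
    · intro c hc
      have hmem : PySem.Chars.upperChar c ∈ List.replicate k U := hmap ▸ List.mem_map_of_mem hc
      have := List.eq_of_mem_replicate hmem
      exact (hp c).mpr ((pv_upperChar_eq_iff U L c hU hL).mp this)

-- one side (A or T) of the final comparison
theorem pv_side (p : Char → Bool) (U L : Char) (l : List Char) (n : Int)
    (hU : 65 ≤ U.toNat ∧ U.toNat ≤ 90) (hL : L.toNat = U.toNat + 32)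
    (hp : ∀ c, p c = true ↔ (c = U ∨ c = L)) :
    ((n : Int) ≤ ((pvMaxRunAux p l 0 0 : Nat) : Int)) ↔
      List.replicate n.toNat U <:+: l.map PySem.Chars.upperChar := by
  by_cases hn : n ≤ 0
  · constructor
    · intro _
      have h0 : n.toNat = 0 := by omega
      rw [h0]; simp
    · intro _
      have : (0 : Int) ≤ ((pvMaxRunAux p l 0 0 : Nat) : Int) := by positivity
      omega
  · rw [← pv_run_iff_replicate p U L l n.toNat hU hL hp, ← pv_le_maxRun_iff]
    omega

-- ===== VERDICT (by name: the statement is the Claim_ definition above) =====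
theorem contain_poly_A_T_spec : Claim_equal_contain_poly_A_T := by
  intro seq n _
  unfold Spec_contain_poly_A_T contain_poly_A_T contain_poly_A_T_alt
  have hfold := pv_foldA_eq seq.toList 0 0 0 0
  simp only [Nat.cast_zero] at hfold
  simp only [hfold]
  have hA := pv_sFold_max pvIsA seq.toList 0 0
  have hT := pv_sFold_max pvIsT seq.toList 0 0
  have hmaxA : ((if ((pvSFold pvIsA seq.toList (0,0)).2 : Int) > ((pvSFold pvIsA seq.toList (0,0)).1 : Int)
      then ((pvSFold pvIsA seq.toList (0,0)).2 : Int) else ((pvSFold pvIsA seq.toList (0,0)).1 : Int))) =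
      ((pvMaxRunAux pvIsA seq.toList 0 0 : Nat) : Int) := by
    rw [← hA]; split_ifs <;> push_cast <;> omega
  have hmaxT : ((if ((pvSFold pvIsT seq.toList (0,0)).2 : Int) > ((pvSFold pvIsT seq.toList (0,0)).1 : Int)
      then ((pvSFold pvIsT seq.toList (0,0)).2 : Int) else ((pvSFold pvIsT seq.toList (0,0)).1 : Int))) =
      ((pvMaxRunAux pvIsT seq.toList 0 0 : Nat) : Int) := by
    rw [← hT]; split_ifs <;> push_cast <;> omega
  simp only [hmaxA, hmaxT]
  have hsA := pv_side pvIsA 'A' 'a' seq.toList n (by decide) (by decide)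
    (by intro c; simp only [pvIsA, Bool.or_eq_true, beq_iff_eq])
  have hsT := pv_side pvIsT 'T' 't' seq.toList n (by decide) (by decide)
    (by intro c; simp only [pvIsT, Bool.or_eq_true, beq_iff_eq])
  rw [Bool.eq_iff_iff]
  simp only [ge_iff_le, PySem.Str.len_eq, gt_iff_lt]
  by_cases hgt : (seq.toList.length : Int) < n
  · rw [if_pos hgt]
    split_ifs with hc
    · exfalso
      rcases hc with h | h
      · have hlen := (hsA.mp h).length_le
        simp only [List.length_replicate, List.length_map] at hlen
        omega
      · have hlen := (hsT.mp h).length_le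
        simp only [List.length_replicate, List.length_map] at hlen
        omega
    · simp
  · rw [if_neg hgt]
    simp only [Bool.or_eq_true, PySem.Str.isIn_iff_infix, PySem.Str.toList_upper,
      PySem.Chars.upper, String.toList_ofList]
    constructor
    · intro h
      split_ifs at h with hc
      exact hc.imp hsA.mp hsT.mp
    · intro h
      rw [if_pos (h.imp hsA.mpr hsT.mpr)]
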